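-- pv_equiv track=rewrite | github.com/ifeoluwaDeterminas/sqlova | wikisql_data_annotate.py | exact_gloss_match
-- ===== SOURCE A (Python) =====
-- def exact_gloss_match(gloss, after, value_gloss, value_after):
--   gloss = [g.lower() for g in gloss]
--   v_len = len(value_gloss)
--   g_len = len(gloss)
--   for i in range(len(gloss)):
--     if i+v_len<=len(gloss) and value_gloss==gloss[i:i+v_len] and value_after[0:v_len-1]==after[i:i+v_len-1]:
--       return i,i+v_len-1
--   return None,None
-- ===== SOURCE B (Python) =====
-- def exact_gloss_match(gloss, after, value_gloss, value_after):
--     g = [w.lower() for w in gloss]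
--     v = len(value_gloss)
--     va = value_after[:v-1]
--     first, rest = value_gloss[0], value_gloss[1:]
--     stop = len(g) - v          # last start position where the value can still fit
--     start = 0
--     while start <= stop:
--         try:
--             i = g.index(first, start, stop + 1)
--         except ValueError:
--             return (None, None)
--         if g[i+1:i+v] == rest and after[i:i+v-1] == va:
--             return (i, i + v - 1)
--         start = i + 1
--     return (None, None)
-- ===== Notes on version B (the rewrite author's own statement) =====
-- stated objective: alternative
-- what changed: B replaces A's per-index slice-compare loop with a candidate-filtering search: it computes the last feasible start position once, repeatedly locates the next occurrence of the first value token with list.index (a C-level scan), and verifies only those candidates against the remaining tokens and the after context; Pre_ excludes empty value_gloss, where B's first-token access naturally raises.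
-- outside the precondition, e.g. on exact_gloss_match([], [], [], []): A returns (None, None), B raises IndexError; on exact_gloss_match(['a'], ['a'], [], ['x', 'y']): A returns (None, None), B raises IndexError
import Mathlib
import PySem

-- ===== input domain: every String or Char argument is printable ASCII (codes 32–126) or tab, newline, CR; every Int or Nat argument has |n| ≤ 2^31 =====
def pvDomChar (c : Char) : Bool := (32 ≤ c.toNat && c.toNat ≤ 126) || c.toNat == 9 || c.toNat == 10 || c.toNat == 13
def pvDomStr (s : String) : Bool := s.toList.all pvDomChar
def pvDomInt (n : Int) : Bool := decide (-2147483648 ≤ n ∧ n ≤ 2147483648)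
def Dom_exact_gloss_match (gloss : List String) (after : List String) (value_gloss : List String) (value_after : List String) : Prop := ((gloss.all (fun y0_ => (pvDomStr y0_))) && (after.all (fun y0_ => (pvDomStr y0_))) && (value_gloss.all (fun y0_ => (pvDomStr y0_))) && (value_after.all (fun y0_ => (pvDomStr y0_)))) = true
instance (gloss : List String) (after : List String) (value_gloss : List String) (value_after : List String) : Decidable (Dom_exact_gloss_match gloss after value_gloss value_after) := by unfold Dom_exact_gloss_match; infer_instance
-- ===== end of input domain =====

-- B searches candidate positions of the first value token (list.index) and verifies only those; objective: alternative.

-- ===== PORT A =====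
-- A's for-loop with early return, over the index list range(len(gloss))
def egmLoopA (gloss' after value_gloss value_after : List String) (v_len g_len : Int) : List Int → Option Int × Option Int
  | [] => (none, none)
  | i :: rest =>
      if i + v_len ≤ g_len ∧ value_gloss = PySem.List.slice gloss' (some i) (some (i + v_len)) ∧
          PySem.List.slice value_after (some 0) (some (v_len - 1)) = PySem.List.slice after (some i) (some (i + v_len - 1))
      then (some i, some (i + v_len - 1))
      else egmLoopA gloss' after value_gloss value_after v_len g_len rest

def exact_gloss_match (gloss : List String) (after : List String) (value_gloss : List String) (value_after : List String) : Option Int × Option Int :=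
  let gloss' := gloss.map PySem.Str.lower
  let v_len : Int := value_gloss.length
  let g_len : Int := gloss'.length
  egmLoopA gloss' after value_gloss value_after v_len g_len (PySem.List.pyRange 0 g_len 1)

-- ===== PORT B =====
-- Source B's while loop: g.index(first, start, stop+1) is the first position i with start ≤ i ≤ stop and
-- g[i] = first (ValueError → (None,None)); ported exactly as a left-to-right scan carrying the absolute
-- position i, with the i ≤ stop window check of index folded in.
def egmLoopB (after : List String) (first : String) (rest : List String) (v : Int) (va : List String) (stop : Int) (g : List String) : List String → Int → Option Int × Option Int
  | [], _ => (none, none)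
  | x :: t, i =>
      if stop < i then (none, none)
      else if x = first then
        if PySem.List.slice g (some (i + 1)) (some (i + v)) = rest ∧
            PySem.List.slice after (some i) (some (i + v - 1)) = va
        then (some i, some (i + v - 1))
        else egmLoopB after first rest v va stop g t (i + 1)
      else egmLoopB after first rest v va stop g t (i + 1)

def exact_gloss_match_alt (gloss : List String) (after : List String) (value_gloss : List String) (value_after : List String) : Option Int × Option Int :=
  let g := gloss.map PySem.Str.lower
  let v : Int := value_gloss.length
  let va := PySem.List.slice value_after (some 0) (some (v - 1))
  match value_gloss with
  | [] => (none, none)   -- Source B raises IndexError on value_gloss[0] here; outside Pre_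
  | first :: rest => egmLoopB after first rest v va ((g.length : Int) - v) g g 0

-- ===== PRECONDITION & SPEC =====
-- Pre_ excludes empty value_gloss (an empty search sequence): B's natural first-token access
-- value_gloss[0] raises IndexError there, so no return value of B can be claimed against A's.
def Pre_exact_gloss_match (gloss : List String) (after : List String) (value_gloss : List String) (value_after : List String) : Prop := value_gloss ≠ []
instance (gloss : List String) (after : List String) (value_gloss : List String) (value_after : List String) : Decidable (Pre_exact_gloss_match gloss after value_gloss value_after) := by unfold Pre_exact_gloss_match; infer_instance

def pvWitness_exact_gloss_match : List String × List String × List String × List String :=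
  (["The", "big", "cat"], ["big", "cat", ""], ["big", "cat"], ["cat", ""])

def Spec_exact_gloss_match (gloss : List String) (after : List String) (value_gloss : List String) (value_after : List String) (out : Option Int × Option Int) : Prop := out = exact_gloss_match_alt gloss after value_gloss value_after
instance (gloss : List String) (after : List String) (value_gloss : List String) (value_after : List String) (out : Option Int × Option Int) : Decidable (Spec_exact_gloss_match gloss after value_gloss value_after out) := by unfold Spec_exact_gloss_match; infer_instance

-- ===== CLAIM (what is proved, stated in full; the proofs are below) =====
def Claim_equal_exact_gloss_match : Prop := ∀ (gloss : List String) (after : List String) (value_gloss : List String) (value_after : List String), Dom_exact_gloss_match gloss after value_gloss value_after → Pre_exact_gloss_match gloss after value_gloss value_after → Spec_exact_gloss_match gloss after value_gloss value_after (exact_gloss_match gloss after value_gloss value_after)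

-- ===== LEMMAS AND PROOFS =====

-- A's loop returns (none,none) when the guard condition fails on every index of the list
theorem egmLoopA_none (gloss' after value_gloss value_after : List String) (v_len g_len : Int)
    (l : List Int)
    (h : ∀ i ∈ l, ¬ (i + v_len ≤ g_len ∧ value_gloss = PySem.List.slice gloss' (some i) (some (i + v_len)) ∧
          PySem.List.slice value_after (some 0) (some (v_len - 1)) = PySem.List.slice after (some i) (some (i + v_len - 1)))) :
    egmLoopA gloss' after value_gloss value_after v_len g_len l = (none, none) := by
  induction l with
  | nil => rfl
  | cons i t ih =>
      rw [egmLoopA, if_neg (h i (List.mem_cons_self ..))]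
      exact ih (fun j hj => h j (List.mem_cons_of_mem _ hj))

-- main loop correspondence: B's candidate scan over the suffix g.drop i equals A's loop over range(i, n)
theorem egmLoopB_eq_loopA (after value_after : List String) (first : String) (rest : List String)
    (g : List String) :
    ∀ (t : List String) (i : Int), 0 ≤ i → g.drop i.toNat = t →
      egmLoopB after first rest ((rest.length : Int) + 1)
          (PySem.List.slice value_after (some 0) (some (((rest.length : Int) + 1) - 1)))
          ((g.length : Int) - ((rest.length : Int) + 1)) g t i =
        egmLoopA g after (first :: rest) value_after ((rest.length : Int) + 1) (g.length : Int)
          (PySem.List.pyRange i (g.length : Int) 1) := by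
  intro t
  induction t with
  | nil =>
      intro i h0 hd
      have hlen : g.length ≤ i.toNat := by
        have := congrArg List.length hd
        simp [List.length_drop] at this
        omega
      rw [PySem.List.pyRange_one_eq_nil (by omega)]
      rfl
  | cons x t ih =>
      intro i h0 hd
      set v : Int := (rest.length : Int) + 1 with hv
      have hvpos : 0 < v := by positivity
      have hlen : i.toNat + t.length + 1 = g.length := by
        have := congrArg List.length hd
        simp [List.length_drop] at this
        omega
      have hdt : g.drop (i.toNat + 1) = t := by
        have : (g.drop i.toNat).drop 1 = g.drop (i.toNat + 1) := by
          rw [List.drop_drop]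
        rw [hd] at this
        simpa using this.symm
      -- the two slices of g at position i
      have hvnat : (i + v).toNat - i.toNat = v.toNat := by omega
      have hsg : PySem.List.slice g (some i) (some (i + v)) = x :: t.take (v.toNat - 1) := by
        rw [PySem.List.slice_toNat g h0 (by omega), hvnat, hd]
        have : v.toNat = (v.toNat - 1) + 1 := by omega
        rw [this, List.take_succ_cons]
        simp
      have hsg2 : PySem.List.slice g (some (i + 1)) (some (i + v)) = t.take (v.toNat - 1) := by
        rw [PySem.List.slice_toNat g (by omega) (by omega)]
        have h1 : (i + 1).toNat = i.toNat + 1 := by omega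
        have h2 : (i + v).toNat - (i.toNat + 1) = v.toNat - 1 := by omega
        rw [h1, h2, hdt]
      have hrec := ih (i + 1) (by omega) (by rw [show (i + 1).toNat = i.toNat + 1 by omega]; exact hdt)
      by_cases hstop : (g.length : Int) - v < i
      · -- window exhausted: A's guard i'+v ≤ g_len fails for every remaining index
        rw [egmLoopB, if_pos hstop]
        refine (egmLoopA_none _ _ _ _ _ _ _ (fun j hj => ?_)).symm
        rw [PySem.List.mem_pyRange_one] at hj
        rintro ⟨hg, -, -⟩
        omega
      · have hiv : i + v ≤ (g.length : Int) := by omega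
        have hin : i < (g.length : Int) := by omega
        rw [PySem.List.pyRange_one_cons hin, egmLoopA, egmLoopB, if_neg hstop]
        by_cases hx : x = first
        · rw [if_pos hx]
          by_cases hb : PySem.List.slice g (some (i + 1)) (some (i + v)) = rest ∧
              PySem.List.slice after (some i) (some (i + v - 1)) =
                PySem.List.slice value_after (some 0) (some (v - 1))
          · rw [if_pos hb, if_pos ?_]
            refine ⟨hiv, ?_, hb.2.symm⟩
            have hrest : rest = t.take (v.toNat - 1) := hb.1.symm.trans hsg2
            rw [hsg, ← hx, ← hrest]
          · rw [if_neg hb, if_neg ?_, hrec]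
            rintro ⟨-, hg, ha⟩
            rw [hsg] at hg
            obtain ⟨hg1, hg2⟩ := List.cons_eq_cons.mp hg
            exact hb ⟨hsg2.trans hg2.symm, ha.symm⟩
        · rw [if_neg hx, if_neg ?_, hrec]
          rintro ⟨-, hg, -⟩
          rw [hsg] at hg
          exact hx (List.cons_eq_cons.mp hg).1.symm

-- ===== VERDICT (by name: the statement is the Claim_ definition above) =====
theorem exact_gloss_match_spec : Claim_equal_exact_gloss_match := by
  intro gloss after value_gloss value_after _ hpre
  unfold Spec_exact_gloss_match exact_gloss_match exact_gloss_match_alt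
  cases value_gloss with
  | nil => exact absurd rfl hpre
  | cons first rest =>
      have hv : ((first :: rest).length : Int) = (rest.length : Int) + 1 := by
        simp
      dsimp only
      rw [hv]
      exact (egmLoopB_eq_loopA after value_after first rest (gloss.map PySem.Str.lower)
        (gloss.map PySem.Str.lower) 0 le_rfl (by simp)).symm
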